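-- pv_equiv track=rewrite | github.com/MartinPavlovski/cancer-comorbidity-analysis | main.py | get_stage_of_patient
-- ===== SOURCE A (Python) =====
-- def is_diag_code_present(diag_code, list_of_general_codes):
-- 	for general_code in list_of_general_codes:
-- 		if diag_code.startswith(general_code):
-- 			return True
-- 	return False
--
-- def get_stage_of_patient(unique_diag_codes, early_diag_codes, late_diag_codes):
-- 	is_at_least_one_code_contained_in_early_diag_codes = False
-- 	is_at_least_one_code_contained_in_late_diag_codes = False
--
-- 	for diag_code in unique_diag_codes:
-- 		# Check if at least one diag_code is contained in early_diag_codes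
-- 		if is_diag_code_present(diag_code, early_diag_codes):
-- 			is_at_least_one_code_contained_in_early_diag_codes = True
-- 			break
--
-- 	for diag_code in unique_diag_codes:
-- 		# Check if at least one diag_code is contained in late_diag_codes
-- 		if is_diag_code_present(diag_code, late_diag_codes):
-- 			is_at_least_one_code_contained_in_late_diag_codes = True
-- 			break
--
-- 	if is_at_least_one_code_contained_in_early_diag_codes == True and is_at_least_one_code_contained_in_late_diag_codes == False:
-- 		return 'early'
--
-- 	if is_at_least_one_code_contained_in_early_diag_codes == True and is_at_least_one_code_contained_in_late_diag_codes == True: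
-- 		return 'late'
--
-- 	return None
-- ===== SOURCE B (Python) =====
-- def get_stage_of_patient(unique_diag_codes, early_diag_codes, late_diag_codes):
--     # Build sets of the general codes once; each diagnosis code matches a list
--     # iff one of its prefixes is in the corresponding set.
--     early_set = set(early_diag_codes)
--     late_set = set(late_diag_codes)
--     has_early = False
--     has_late = False
--     for code in unique_diag_codes:
--         if not (has_early and has_late):
--             prefixes = set(code[:i] for i in range(len(code) + 1))
--             if not has_early and not prefixes.isdisjoint(early_set):
--                 has_early = True
--             if not has_late and not prefixes.isdisjoint(late_set):
--                 has_late = True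
--     if not has_early:
--         return None
--     return 'late' if has_late else 'early'
-- ===== Notes on version B (the rewrite author's own statement) =====
-- stated objective: alternative
-- what changed: Replaces A's two passes that linearly scan the general-code lists per diagnosis code by a single fused pass that tests each code's prefix set against hash sets of the general codes.
import Mathlib
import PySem

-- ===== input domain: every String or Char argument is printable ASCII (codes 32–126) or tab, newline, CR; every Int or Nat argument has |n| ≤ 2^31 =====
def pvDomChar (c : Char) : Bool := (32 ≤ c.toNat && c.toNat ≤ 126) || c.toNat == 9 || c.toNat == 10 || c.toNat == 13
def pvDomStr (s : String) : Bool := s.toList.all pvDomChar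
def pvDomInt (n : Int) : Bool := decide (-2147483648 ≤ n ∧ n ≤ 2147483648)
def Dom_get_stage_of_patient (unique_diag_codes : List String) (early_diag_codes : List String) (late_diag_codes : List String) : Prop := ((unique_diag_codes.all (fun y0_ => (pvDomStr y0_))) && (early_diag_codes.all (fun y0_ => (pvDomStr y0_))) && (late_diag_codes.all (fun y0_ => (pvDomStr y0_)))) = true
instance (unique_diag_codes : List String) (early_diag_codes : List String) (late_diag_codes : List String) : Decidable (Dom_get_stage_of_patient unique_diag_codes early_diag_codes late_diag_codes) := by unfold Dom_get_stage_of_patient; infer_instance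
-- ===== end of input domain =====

-- B replaces A's two passes that scan the general-code lists per diagnosis code by one fused
-- pass testing each code's prefix set against hash sets built once (objective: alternative).


-- ===== PORT A =====
def is_diag_code_present (diag_code : String) (list_of_general_codes : List String) : Bool :=
  match list_of_general_codes with
  | [] => false
  | g :: gs => if PySem.Str.startswith diag_code g then true else is_diag_code_present diag_code gs

-- A's 'for … if …: flag = True; break' loop (flag result)
def pvLoopPresent (codes : List String) (gens : List String) : Bool :=
  match codes with
  | [] => false
  | c :: cs => if is_diag_code_present c gens then true else pvLoopPresent cs gens

def get_stage_of_patient (unique_diag_codes : List String) (early_diag_codes : List String) (late_diag_codes : List String) : Option String :=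
  let he := pvLoopPresent unique_diag_codes early_diag_codes
  let hl := pvLoopPresent unique_diag_codes late_diag_codes
  if he == true && hl == false then some "early"
  else if he == true && hl == true then some "late"
  else none

-- ===== PORT B =====
-- set(code[:i] for i in range(len(code)+1))
def pvPrefixes (code : String) : PySem.Set String :=
  PySem.Set.ofList ((PySem.List.pyRange 0 ((PySem.Str.len code : Int) + 1) 1).map
    (fun i => PySem.Str.slice code none (some i)))

def get_stage_of_patient_alt (unique_diag_codes : List String) (early_diag_codes : List String) (late_diag_codes : List String) : Option String :=
  let early_set := PySem.Set.ofList early_diag_codes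
  let late_set := PySem.Set.ofList late_diag_codes
  let flags := unique_diag_codes.foldl (fun (p : Bool × Bool) code =>
    if !(p.1 && p.2) then
      let prefixes := pvPrefixes code
      let he := if !p.1 && !(PySem.Set.isdisjoint prefixes early_set) then true else p.1
      let hl := if !p.2 && !(PySem.Set.isdisjoint prefixes late_set) then true else p.2
      (he, hl)
    else p) (false, false)
  if !flags.1 then none
  else if flags.2 then some "late" else some "early"

-- ===== PRECONDITION & SPEC =====
def Spec_get_stage_of_patient (unique_diag_codes : List String) (early_diag_codes : List String) (late_diag_codes : List String) (out : Option String) : Prop := out = get_stage_of_patient_alt unique_diag_codes early_diag_codes late_diag_codes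
instance (unique_diag_codes : List String) (early_diag_codes : List String) (late_diag_codes : List String) (out : Option String) : Decidable (Spec_get_stage_of_patient unique_diag_codes early_diag_codes late_diag_codes out) := by unfold Spec_get_stage_of_patient; infer_instance

-- ===== CLAIM (what is proved, stated in full; the proofs are below) =====
def Claim_equal_get_stage_of_patient : Prop := ∀ (unique_diag_codes : List String) (early_diag_codes : List String) (late_diag_codes : List String), Dom_get_stage_of_patient unique_diag_codes early_diag_codes late_diag_codes → Spec_get_stage_of_patient unique_diag_codes early_diag_codes late_diag_codes (get_stage_of_patient unique_diag_codes early_diag_codes late_diag_codes)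

-- ===== LEMMAS AND PROOFS =====

-- A's helper is an existence test over the general codes
theorem is_diag_code_present_eq_any (c : String) (gens : List String) :
    is_diag_code_present c gens = gens.any (fun g => PySem.Str.startswith c g) := by
  induction gens with
  | nil => rfl
  | cons g gs ih =>
    simp only [is_diag_code_present, List.any_cons]
    split_ifs with h
    · rw [h, Bool.true_or]
    · simp only [Bool.not_eq_true] at h
      rw [h, Bool.false_or, ih]

-- A's flag loop is an existence test over the diagnosis codes
theorem pvLoopPresent_eq_any (codes gens : List String) :
    pvLoopPresent codes gens = codes.any (fun c => gens.any (fun g => PySem.Str.startswith c g)) := by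
  induction codes with
  | nil => rfl
  | cons c cs ih =>
    simp only [pvLoopPresent, List.any_cons]
    rw [is_diag_code_present_eq_any]
    split_ifs with h
    · rw [h, Bool.true_or]
    · simp only [Bool.not_eq_true] at h
      rw [h, Bool.false_or, ih]

-- B's prefix-set/hash-set test coincides with A's startswith scan
theorem pv_disjoint_eq_any (c : String) (gens : List String) :
    (!(PySem.Set.isdisjoint (pvPrefixes c) (PySem.Set.ofList gens)))
      = gens.any (fun g => PySem.Str.startswith c g) := by
  rw [Bool.eq_iff_iff, Bool.not_eq_true', Bool.eq_false_iff, Ne, PySem.Set.isdisjoint_iff]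
  push Not
  rw [List.any_eq_true]
  constructor
  · rintro ⟨x, hxP, hxG⟩
    rw [PySem.Set.mem_ofList] at hxG
    refine ⟨x, hxG, ?_⟩
    unfold pvPrefixes at hxP
    rw [PySem.Set.mem_ofList, List.mem_map] at hxP
    obtain ⟨i, hi, hx⟩ := hxP
    rw [PySem.List.mem_pyRange_one] at hi
    have hsl : (PySem.Str.slice c none (some i)).toList = c.toList.take i.toNat := by
      simp [PySem.List.slice_to _ hi.1]
    rw [PySem.Str.startswith_eq, PySem.Chars.startswith_iff, ← hx, hsl]
    exact List.take_prefix _ _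
  · rintro ⟨g, hg, hsw⟩
    rw [PySem.Str.startswith_eq, PySem.Chars.startswith_iff] at hsw
    refine ⟨g, ?_, (by rw [PySem.Set.mem_ofList]; exact hg : _)⟩
    unfold pvPrefixes
    rw [PySem.Set.mem_ofList, List.mem_map]
    refine ⟨(g.toList.length : Int), ?_, ?_⟩
    · rw [PySem.List.mem_pyRange_one]
      have := hsw.length_le
      constructor
      · positivity
      · have hlen : (PySem.Str.len c : Int) = (c.toList.length : Int) := by simp
        omega
    · apply String.toList_inj.mp
      have hsl : (PySem.Str.slice c none (some (g.toList.length : Int))).toList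
          = c.toList.take g.toList.length := by
        simp
      rw [hsl, ← List.prefix_iff_eq_take.mp hsw]

-- one step of B's fold sets each flag from its previous value or the current code's test
theorem pv_fold_step (eset lset : PySem.Set String) (a b : Bool) (c : String) :
    (if !(a && b) then
        let prefixes := pvPrefixes c
        let he := if !a && !(PySem.Set.isdisjoint prefixes eset) then true else a
        let hl := if !b && !(PySem.Set.isdisjoint prefixes lset) then true else b
        (he, hl)
      else (a, b))
      = (a || !(PySem.Set.isdisjoint (pvPrefixes c) eset),
         b || !(PySem.Set.isdisjoint (pvPrefixes c) lset)) := by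
  cases a <;> cases b <;>
    cases hE : (!(PySem.Set.isdisjoint (pvPrefixes c) eset)) <;>
    cases hL : (!(PySem.Set.isdisjoint (pvPrefixes c) lset)) <;>
    simp [hE, hL]

-- B's fused fold computes the pair of existence flags
theorem pv_fold_flags (codes : List String) (eset lset : PySem.Set String) (a b : Bool) :
    codes.foldl (fun (p : Bool × Bool) code =>
      if !(p.1 && p.2) then
        let prefixes := pvPrefixes code
        let he := if !p.1 && !(PySem.Set.isdisjoint prefixes eset) then true else p.1
        let hl := if !p.2 && !(PySem.Set.isdisjoint prefixes lset) then true else p.2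
        (he, hl)
      else p) (a, b)
      = (a || codes.any (fun c => !(PySem.Set.isdisjoint (pvPrefixes c) eset)),
         b || codes.any (fun c => !(PySem.Set.isdisjoint (pvPrefixes c) lset))) := by
  induction codes generalizing a b with
  | nil => simp
  | cons c cs ih =>
    rw [List.foldl_cons]
    dsimp only
    rw [pv_fold_step eset lset a b c, ih]
    simp [List.any_cons, Bool.or_assoc]

-- ===== VERDICT (by name: the statement is the Claim_ definition above) =====
theorem get_stage_of_patient_spec : Claim_equal_get_stage_of_patient := by
  intro u e l _
  unfold Spec_get_stage_of_patient get_stage_of_patient get_stage_of_patient_alt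
  dsimp only
  rw [pv_fold_flags]
  simp only [Bool.false_or]
  have hE : (u.any fun c => !(PySem.Set.isdisjoint (pvPrefixes c) (PySem.Set.ofList e)))
      = pvLoopPresent u e := by
    rw [pvLoopPresent_eq_any]
    simp only [pv_disjoint_eq_any]
  have hL : (u.any fun c => !(PySem.Set.isdisjoint (pvPrefixes c) (PySem.Set.ofList l)))
      = pvLoopPresent u l := by
    rw [pvLoopPresent_eq_any]
    simp only [pv_disjoint_eq_any]
  rw [hE, hL]
  cases pvLoopPresent u e <;> cases pvLoopPresent u l <;> simp
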